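-- pv_equiv track=rewrite | github.com/kami-sa/python_lab3 | 21.1.py | from_string_to_list
-- ===== SOURCE A (Python) =====
-- def from_string_to_list(string, container):
--     string = string[::-1]
--     string = string.split()
--     i = 0;
--     while len(string) != 0:
--         container.append(string.pop())
--         i += 1
--     return container
-- ===== SOURCE B (Python) =====
-- def from_string_to_list(string, container):
--     for w in string.split():
--         container.append(w[::-1])
--     return container
-- ===== Notes on version B (the rewrite author's own statement) =====
-- stated objective: simpler
-- what changed: B splits the original string once and appends each word with its characters reversed, replacing A's reverse-whole-string, split, and pop-from-the-tail while loop.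
import Mathlib
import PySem

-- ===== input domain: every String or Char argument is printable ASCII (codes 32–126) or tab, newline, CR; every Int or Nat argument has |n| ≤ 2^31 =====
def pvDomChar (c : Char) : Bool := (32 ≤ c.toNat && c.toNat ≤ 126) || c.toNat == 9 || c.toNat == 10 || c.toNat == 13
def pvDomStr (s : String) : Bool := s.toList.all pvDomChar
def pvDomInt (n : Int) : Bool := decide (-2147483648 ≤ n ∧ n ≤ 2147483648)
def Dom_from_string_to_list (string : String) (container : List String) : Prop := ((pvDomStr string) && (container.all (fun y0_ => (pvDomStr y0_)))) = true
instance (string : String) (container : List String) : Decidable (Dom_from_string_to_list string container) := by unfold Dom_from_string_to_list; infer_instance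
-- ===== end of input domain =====

-- B splits the original string once and appends each word with its characters
-- reversed, replacing A's reverse-whole-string / split / pop-from-the-tail loop
-- (objective: simpler). Both A and B mutate `container` by the same appends in
-- Python; the theorems below are about the return value.

-- ===== PORT A =====
-- A's while loop: while len(string) != 0: container.append(string.pop())
def fromStrPopLoop (ws cont : List String) : List String :=
  match h : PySem.List.pop? ws (-1) with
  | none => cont
  | some vr => fromStrPopLoop vr.2 (cont ++ [vr.1])
termination_by ws.length
decreasing_by
  have := PySem.List.length_of_pop?_eq_some ws h
  omega

def from_string_to_list (string : String) (container : List String) : List String :=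
  -- string = string[::-1]  (slice? with step -1 is always `some`; getD keeps it total)
  let s := (PySem.Str.slice? string none none (-1)).getD string
  -- string = string.split()
  let ws := PySem.Str.split₀ s
  fromStrPopLoop ws container

-- ===== PORT B =====
def from_string_to_list_alt (string : String) (container : List String) : List String :=
  (PySem.Str.split₀ string).foldl
    (fun c w => c ++ [(PySem.Str.slice? w none none (-1)).getD w]) container

-- ===== PRECONDITION & SPEC =====
def Spec_from_string_to_list (string : String) (container : List String) (out : List String) : Prop := out = from_string_to_list_alt string container
instance (string : String) (container : List String) (out : List String) : Decidable (Spec_from_string_to_list string container out) := by unfold Spec_from_string_to_list; infer_instance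

-- ===== CLAIM (what is proved, stated in full; the proofs are below) =====
def Claim_equal_from_string_to_list : Prop := ∀ (string : String) (container : List String), Dom_from_string_to_list string container → Spec_from_string_to_list string container (from_string_to_list string container)

-- ===== LEMMAS AND PROOFS =====

-- A's pop loop moves the words to `cont` back-to-front.
theorem fromStrPopLoop_eq (ws cont : List String) :
    fromStrPopLoop ws cont = cont ++ ws.reverse := by
  by_cases hne : ws = []
  · subst hne
    rw [fromStrPopLoop]
    split
    · simp
    · next vr h => simp [PySem.List.pop?] at h
  · have hpop : PySem.List.pop? ws (-1) = some (ws.getLast hne, ws.dropLast) := by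
      conv_lhs => rw [← List.dropLast_append_getLast hne]
      exact PySem.List.pop?_last _ _
    rw [fromStrPopLoop]
    split
    · next h => rw [hpop] at h; cases h
    · next vr h =>
      rw [hpop] at h
      cases h
      rw [fromStrPopLoop_eq ws.dropLast (cont ++ [ws.getLast hne])]
      conv_rhs => rw [← List.dropLast_append_getLast hne]
      simp
termination_by ws.length
decreasing_by
  have := List.length_pos_of_ne_nil hne
  simp only [List.length_dropLast]
  omega

-- B's fold appends the reversed words in order.
theorem foldl_append_map {α β : Type} (f : α → β) (l : List α) (cont : List β) :
    l.foldl (fun c w => c ++ [f w]) cont = cont ++ l.map f := by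
  induction l generalizing cont with
  | nil => simp
  | cons a t ih => simp [List.foldl, ih]

-- wsplit mirrors PySem.Chars.split₀.go without the output accumulator.
def wsplit : List Char → List Char → List (List Char)
  | [], cur => if cur.isEmpty then [] else [cur.reverse]
  | c :: rest, cur =>
    if PySem.Chars.isspace c then
      if cur.isEmpty then wsplit rest [] else cur.reverse :: wsplit rest []
    else wsplit rest (c :: cur)

theorem splitgo_eq_wsplit (l cur : List Char) (acc : List (List Char)) :
    PySem.Chars.split₀.go l cur acc = acc.reverse ++ wsplit l cur := by
  induction l generalizing cur acc with
  | nil =>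
    rw [PySem.Chars.split₀.go, wsplit]
    split_ifs <;> simp
  | cons c rest ih =>
    rw [PySem.Chars.split₀.go, wsplit]
    split_ifs with h1 h2
    · exact ih [] acc
    · rw [ih [] (cur.reverse :: acc)]
      simp
    · exact ih (c :: cur) acc

theorem split₀_eq_wsplit (l : List Char) :
    PySem.Chars.split₀ l = wsplit l [] := by
  have := splitgo_eq_wsplit l [] []
  simpa [PySem.Chars.split₀] using this

-- (W1) scanning a space-free block accumulates it onto cur.
theorem wsplit_nonspace_prefix (w : List Char) (hw : ∀ c ∈ w, PySem.Chars.isspace c = false) :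
    ∀ (r cur : List Char), wsplit (w ++ r) cur = wsplit r (w.reverse ++ cur) := by
  induction w with
  | nil => intro r cur; simp
  | cons c t ih =>
    intro r cur
    have hc : PySem.Chars.isspace c = false := hw c (by simp)
    have ht : ∀ c ∈ t, PySem.Chars.isspace c = false := fun x hx => hw x (by simp [hx])
    simp only [List.cons_append, wsplit, hc, Bool.false_eq_true, if_false]
    rw [ih ht r (c :: cur)]
    simp

-- a nonempty space-free list is a single word.
theorem wsplit_word (w : List Char) (hne : w ≠ [])
    (hw : ∀ c ∈ w, PySem.Chars.isspace c = false) :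
    wsplit w [] = [w] := by
  have := wsplit_nonspace_prefix w hw [] []
  simp only [List.append_nil] at this
  rw [this]
  simp [wsplit, List.isEmpty_iff, hne]

-- (W5) a trailing space character never changes the result.
theorem wsplit_append_space (c : Char) (hc : PySem.Chars.isspace c = true) :
    ∀ (x cur : List Char), wsplit (x ++ [c]) cur = wsplit x cur := by
  intro x
  induction x with
  | nil => intro cur; cases cur <;> simp [wsplit, hc]
  | cons d t ih =>
    intro cur
    simp only [List.cons_append, wsplit]
    split_ifs <;> simp [ih]

-- (W4) the scan splits cleanly after a space character.
theorem wsplit_split_at_space (c : Char) (hc : PySem.Chars.isspace c = true) :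
    ∀ (x y cur : List Char),
      wsplit (x ++ [c] ++ y) cur = wsplit (x ++ [c]) cur ++ wsplit y [] := by
  intro x
  induction x with
  | nil =>
    intro y cur
    cases cur <;> simp [wsplit, hc]
  | cons d t ih =>
    intro y cur
    simp only [List.cons_append, wsplit]
    split_ifs <;>
      first
        | simpa using ih y []
        | simpa using ih y (d :: cur)

-- Reversing the input reverses the word list and each word.
theorem wsplit_reverse (l : List Char) :
    wsplit l.reverse [] = ((wsplit l []).map List.reverse).reverse := by
  induction hn : l.length using Nat.strong_induction_on generalizing l with
  | _ n ih =>
  match l with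
  | [] => simp [wsplit]
  | c :: m =>
    by_cases hc : PySem.Chars.isspace c = true
    · have h1 : wsplit (c :: m) [] = wsplit m [] := by simp [wsplit, hc]
      have h2 : (c :: m).reverse = m.reverse ++ [c] := by simp
      rw [h1, h2, wsplit_append_space c hc]
      exact ih m.length (by simp [← hn]) m rfl
    · -- c starts a word
      have hc' : PySem.Chars.isspace c = false := by simpa using hc
      have hsplit0 : List.takeWhile (fun x => !(PySem.Chars.isspace x)) (c :: m) ++
          List.dropWhile (fun x => !(PySem.Chars.isspace x)) (c :: m) = c :: m :=
        List.takeWhile_append_dropWhile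
      have hwne : List.takeWhile (fun x => !(PySem.Chars.isspace x)) (c :: m) ≠ [] := by
        simp [List.takeWhile, hc']
      have hwns : ∀ x ∈ List.takeWhile (fun x => !(PySem.Chars.isspace x)) (c :: m),
          PySem.Chars.isspace x = false := by
        intro x hx
        simpa using List.mem_takeWhile_imp hx
      have hwpos : 0 < (List.takeWhile (fun x => !(PySem.Chars.isspace x)) (c :: m)).length :=
        List.length_pos_of_ne_nil hwne
      rcases hdw : List.dropWhile (fun x => !(PySem.Chars.isspace x)) (c :: m) with _ | ⟨d, b'⟩
      · -- no space after the first word: l is a single word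
        rw [hdw] at hsplit0
        have hcm : List.takeWhile (fun x => !(PySem.Chars.isspace x)) (c :: m) = c :: m := by
          simpa using hsplit0
        have hrev : wsplit (c :: m).reverse [] = [(c :: m).reverse] := by
          apply wsplit_word
          · simp
          · intro x hx
            exact hwns x (by rw [hcm]; exact List.mem_reverse.mp hx)
        have hfwd : wsplit (c :: m) [] = [c :: m] :=
          wsplit_word (c :: m) (by simp) (fun x hx => hwns x (by rw [hcm]; exact hx))
        rw [hrev, hfwd]; simp
      · -- a space follows the first word
        have hd : PySem.Chars.isspace d = true := by
          have := List.head_dropWhile_not (fun x => !(PySem.Chars.isspace x))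
            (l := c :: m) (by simp [hdw])
          simp only [hdw, List.head_cons] at this
          simpa using this
        rw [hdw] at hsplit0
        generalize hgw : List.takeWhile (fun x => !(PySem.Chars.isspace x)) (c :: m) = w
          at hsplit0 hwne hwns hwpos
        have hlen : w.length + (d :: b').length = (c :: m).length := by
          rw [← hsplit0]; simp
        -- forward scan: first word then the rest
        have hfwd : wsplit (c :: m) [] = w :: wsplit b' [] := by
          conv_lhs => rw [← hsplit0]
          rw [wsplit_nonspace_prefix w hwns (d :: b') []]
          simp [wsplit, hd, List.isEmpty_iff, hwne]
        -- reverse side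
        have hrsplit : (c :: m).reverse = (b'.reverse ++ [d]) ++ w.reverse := by
          rw [← hsplit0]; simp
        have hIH : wsplit b'.reverse [] = ((wsplit b' []).map List.reverse).reverse := by
          apply ih b'.length _ b' rfl
          simp only [List.length_cons] at hlen hn
          omega
        have hrw : wsplit ((b'.reverse ++ [d]) ++ w.reverse) [] =
            wsplit (b'.reverse ++ [d]) [] ++ wsplit w.reverse [] :=
          wsplit_split_at_space d hd b'.reverse w.reverse []
        have hwrev : wsplit w.reverse [] = [w.reverse] := by
          apply wsplit_word
          · simpa using hwne
          · intro x hx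
            exact hwns x (List.mem_reverse.mp hx)
        have hbrev : wsplit (b'.reverse ++ [d]) [] = wsplit b'.reverse [] :=
          wsplit_append_space d hd b'.reverse []
        rw [hrsplit, hrw, hbrev, hIH, hwrev, hfwd]
        simp

-- string-level assembly
theorem split₀_reverse (s : String) :
    PySem.Str.split₀ (String.ofList s.toList.reverse) =
      ((PySem.Str.split₀ s).map
        (fun w => String.ofList w.toList.reverse)).reverse := by
  have hchars : PySem.Chars.split₀ s.toList.reverse =
      ((PySem.Chars.split₀ s.toList).map List.reverse).reverse := by
    rw [split₀_eq_wsplit, split₀_eq_wsplit, wsplit_reverse]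
  simp only [PySem.Str.split₀]
  have hofl : (String.ofList s.toList.reverse).toList = s.toList.reverse := by simp
  rw [hofl, hchars]
  simp [List.map_map, Function.comp_def]

-- ===== VERDICT (by name: the statement is the Claim_ definition above) =====
theorem from_string_to_list_spec : Claim_equal_from_string_to_list := by
  intro string container _
  unfold Spec_from_string_to_list from_string_to_list from_string_to_list_alt
  rw [PySem.Str.slice?_none_none_neg_one]
  simp only [Option.getD_some]
  rw [fromStrPopLoop_eq, split₀_reverse, foldl_append_map]
  simp only [List.reverse_reverse]
  congr 1
  apply List.map_congr_left
  intro w _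
  rw [PySem.Str.slice?_none_none_neg_one]
  simp
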